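-- pv_equiv track=rewrite | github.com/mufeng1136/nonogram-solver-py | solver/solver.py | _inter2pos
-- ===== SOURCE A (Python) =====
-- def _inter2pos(_clue: list[int], _inter: list[int]) -> list[int]:
--     """
--     Compute the starting index of each block given clue and inter-gap increments.
--
--     Args:
--         _clue: List of block lengths, e.g., [2, 1, 3]
--         _inter: List of extra spaces for the first len(_clue) gaps:
--                 - _inter[0]: extra spaces before the first block
--                 - _inter[i] for i>=1: extra spaces in the gap between block (i-1) and block i
--
--     Returns:
--         A list of starting indices for each block.
--         Example: _clue=[2,1], _inter=[1,0] → blocks start at [1, 1+2+1+0 = 4] → [1, 4]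
--     """
--     if not _clue:
--         return []
--
--     k = len(_clue)
--     if len(_inter) != k:
--         raise ValueError(f"_inter must have length {k} (same as clue), got {len(_inter)}")
--
--     starts = []
--     current_pos = _inter[0]  # leading extra spaces
--
--     for i in range(k):
--         starts.append(current_pos)
--         # Add current block length
--         current_pos += _clue[i]
--         # Add mandatory gap (1 zero) + extra gap (if not last block)
--         if i < k - 1:
--             current_pos += 1 + _inter[i + 1]
--
--     return starts
-- ===== SOURCE B (Python) =====
-- def _inter2pos(_clue: list[int], _inter: list[int]) -> list[int]:
--     if not _clue:
--         return []
--     k = len(_clue)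
--     if len(_inter) != k:
--         raise ValueError(f"_inter must have length {k} (same as clue), got {len(_inter)}")
--     clue_pre = []   # clue_pre[i] = sum(_clue[:i])
--     s = 0
--     for c in _clue:
--         clue_pre.append(s)
--         s += c
--     inter_pre = []  # inter_pre[i] = sum(_inter[:i+1])
--     t = 0
--     for x in _inter:
--         t += x
--         inter_pre.append(t)
--     return [clue_pre[i] + inter_pre[i] + i for i in range(k)]
-- ===== Notes on version B (the rewrite author's own statement) =====
-- stated objective: alternative
-- what changed: Replaces A's single interleaved running-position loop by two independent prefix-sum tables (block lengths and cumulative extra gaps) combined positionally in a comprehension as clue_pre[i] + inter_pre[i] + i.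
import Mathlib
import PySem

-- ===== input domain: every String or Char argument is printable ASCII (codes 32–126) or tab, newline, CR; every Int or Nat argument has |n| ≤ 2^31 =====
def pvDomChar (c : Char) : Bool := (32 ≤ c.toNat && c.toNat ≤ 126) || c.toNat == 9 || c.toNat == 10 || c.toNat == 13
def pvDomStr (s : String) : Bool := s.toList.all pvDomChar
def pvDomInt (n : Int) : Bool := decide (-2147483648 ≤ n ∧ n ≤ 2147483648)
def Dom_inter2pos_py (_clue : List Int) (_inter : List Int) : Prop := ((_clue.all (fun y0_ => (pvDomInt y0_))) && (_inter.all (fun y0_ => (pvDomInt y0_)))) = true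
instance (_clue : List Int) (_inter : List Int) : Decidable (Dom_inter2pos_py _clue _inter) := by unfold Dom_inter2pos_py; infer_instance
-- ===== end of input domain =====

-- B replaces A's single interleaved running-position loop by two independent prefix-sum
-- tables combined positionally; alternative decomposition, same O(n) cost.


-- ===== PORT A =====
def inter2pos_py (_clue : List Int) (_inter : List Int) : List Int :=
  if _clue.isEmpty then []
  else
    let k := _clue.length
    -- (the length-mismatch branch raises ValueError: excluded by Pre_)
    let res := (PySem.List.pyRange 0 (k : Int) 1).foldl (fun (s : List Int × Int) i =>
      let starts := s.1 ++ [s.2]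
      let cur := s.2 + PySem.List.pyGetD _clue i 0
      let cur := if i < (k : Int) - 1 then cur + 1 + PySem.List.pyGetD _inter (i + 1) 0 else cur
      (starts, cur)) ([], PySem.List.pyGetD _inter 0 0)
    res.1

-- ===== PORT B =====
def inter2pos_py_alt (_clue : List Int) (_inter : List Int) : List Int :=
  if _clue.isEmpty then []
  else
    let k := _clue.length
    -- (the length-mismatch branch raises ValueError: excluded by Pre_)
    let cp := (_clue.foldl (fun (p : List Int × Int) c => (p.1 ++ [p.2], p.2 + c)) ([], 0)).1
    let ip := (_inter.foldl (fun (p : List Int × Int) x => (p.1 ++ [p.2 + x], p.2 + x)) ([], 0)).1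
    (PySem.List.pyRange 0 (k : Int) 1).map (fun i => PySem.List.pyGetD cp i 0 + PySem.List.pyGetD ip i 0 + i)

-- ===== PRECONDITION & SPEC =====
-- Pre_ excludes only the inputs on which A raises ValueError: a nonempty _clue with
-- _inter of a different length (B raises the same ValueError there).
def Pre_inter2pos_py (_clue : List Int) (_inter : List Int) : Prop :=
  _clue = [] ∨ _inter.length = _clue.length
instance (_clue : List Int) (_inter : List Int) : Decidable (Pre_inter2pos_py _clue _inter) := by unfold Pre_inter2pos_py; infer_instance
def pvWitness_inter2pos_py : List Int × List Int := ([2, 1], [1, 0])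
def Spec_inter2pos_py (_clue : List Int) (_inter : List Int) (out : List Int) : Prop := out = inter2pos_py_alt _clue _inter
instance (_clue : List Int) (_inter : List Int) (out : List Int) : Decidable (Spec_inter2pos_py _clue _inter out) := by unfold Spec_inter2pos_py; infer_instance

-- ===== CLAIM (what is proved, stated in full; the proofs are below) =====
def Claim_equal_inter2pos_py : Prop := ∀ (_clue : List Int) (_inter : List Int), Dom_inter2pos_py _clue _inter → Pre_inter2pos_py _clue _inter → Spec_inter2pos_py _clue _inter (inter2pos_py _clue _inter)

-- ===== LEMMAS AND PROOFS =====

-- the common closed form: start of block i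
def pvS (clue inter : List Int) (i : Nat) : Int :=
  (clue.take i).sum + (inter.take (i + 1)).sum + (i : Int)

-- B's first fold builds the exclusive prefix-sum table
theorem pv_foldl_excl (xs : List Int) (acc : List Int) (s : Int) :
    (xs.foldl (fun (p : List Int × Int) c => (p.1 ++ [p.2], p.2 + c)) (acc, s)).1
      = acc ++ (List.range xs.length).map (fun i => s + (xs.take i).sum) := by
  induction xs generalizing acc s with
  | nil => simp
  | cons x xs ih =>
      simp only [List.foldl_cons, ih, List.length_cons, List.range_succ_eq_map,
        List.map_cons, List.map_map, List.take_zero, List.sum_nil, add_zero]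
      simp [Function.comp, List.take_succ_cons, add_assoc, List.append_assoc]

-- B's second fold builds the inclusive prefix-sum table
theorem pv_foldl_incl (xs : List Int) (acc : List Int) (s : Int) :
    (xs.foldl (fun (p : List Int × Int) x => (p.1 ++ [p.2 + x], p.2 + x)) (acc, s)).1
      = acc ++ (List.range xs.length).map (fun i => s + (xs.take (i + 1)).sum) := by
  induction xs generalizing acc s with
  | nil => simp
  | cons x xs ih =>
      simp only [List.foldl_cons, ih, List.length_cons, List.range_succ_eq_map,
        List.map_cons, List.map_map]
      simp [Function.comp, List.take_succ_cons, add_assoc, List.append_assoc]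

-- A's loop invariant: after n iterations (n ≤ k) the starts list is the S-table and the
-- running position is the value C n below.
theorem pv_A_inv (clue inter : List Int) (h : inter.length = clue.length)
    (hne : clue ≠ []) (n : Nat) (hn : n ≤ clue.length) :
    ((List.range n).foldl (fun (s : List Int × Int) (i : Nat) =>
      let starts := s.1 ++ [s.2]
      let cur := s.2 + PySem.List.pyGetD clue (i : Int) 0
      let cur := if (i : Int) < (clue.length : Int) - 1 then cur + 1 + PySem.List.pyGetD inter ((i : Int) + 1) 0 else cur
      (starts, cur)) ([], PySem.List.pyGetD inter 0 0))
      = ((List.range n).map (pvS clue inter),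
         (clue.take n).sum + (inter.take (min (n + 1) clue.length)).sum + (min n (clue.length - 1) : Nat)) := by
  induction n with
  | zero =>
      have hk : 0 < clue.length := List.length_pos_of_ne_nil hne
      have h0 : PySem.List.pyGetD inter 0 0 = inter.getD 0 0 := PySem.List.pyGetD_natCast inter 0 0
      simp only [List.range_zero, List.foldl_nil, List.map_nil, List.take_zero, List.sum_nil,
        Prod.mk.injEq, true_and]
      · rw [h0]
        have hm1 : min (0 + 1) clue.length = 1 := by omega
        rw [hm1]
        have h1 : 0 < inter.length := by omega
        rw [List.getD_eq_getElem inter 0 h1]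
        have : inter.take 1 = [inter[0]] := by
          cases inter with
          | nil => simp at h1
          | cons a t => simp
        simp [this]
  | succ n ih =>
      have hn' : n ≤ clue.length := Nat.le_of_succ_le hn
      have hnlt : n < clue.length := hn
      rw [List.range_succ, List.foldl_append, ih hn']
      simp only [List.foldl_cons, List.foldl_nil]
      have hmin1 : min (n + 1) clue.length = n + 1 := by omega
      have hminn : min n (clue.length - 1) = n := by omega
      rw [hmin1, hminn]
      have hget : PySem.List.pyGetD clue ((n : Nat) : Int) 0 = clue.getD n 0 :=
        PySem.List.pyGetD_natCast clue n 0
      rw [Prod.mk.injEq]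
      constructor
      · rw [List.map_append]
        simp [pvS]
      · -- the new running position
        rw [hget, List.getD_eq_getElem clue 0 hnlt]
        by_cases hlast : (n : Int) < (clue.length : Int) - 1
        · have hlt : n + 1 < clue.length := by omega
          have hlti : n + 1 < inter.length := by omega
          simp only [if_pos hlast]
          have hgi : PySem.List.pyGetD inter (((n : Nat) : Int) + 1) 0 = inter.getD (n + 1) 0 := by
            have := PySem.List.pyGetD_natCast inter (n + 1) 0
            push_cast at this
            exact this
          rw [hgi, List.getD_eq_getElem inter 0 hlti]
          have hmin2 : min (n + 1 + 1) clue.length = n + 2 := by omega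
          rw [hmin2]
          rw [List.sum_take_succ clue n hnlt, List.sum_take_succ inter (n + 1) hlti]
          have hminr : min (n + 1) (clue.length - 1) = n + 1 := by omega
          rw [hminr]
          push_cast
          ring
        · have hend : n + 1 = clue.length := by omega
          simp only [if_neg hlast]
          have hmin2 : min (n + 1 + 1) clue.length = clue.length := by omega
          rw [hmin2]
          rw [List.sum_take_succ clue n hnlt]
          have hminr : min (n + 1) (clue.length - 1) = n := by omega
          rw [hminr]
          have hti : inter.take clue.length = inter.take (n + 1) := by rw [hend]
          rw [hti]
          ring

-- A computes the S-table
theorem pv_A_eq (clue inter : List Int) (h : inter.length = clue.length) (hne : clue ≠ []) :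
    inter2pos_py clue inter = (List.range clue.length).map (pvS clue inter) := by
  unfold inter2pos_py
  rw [if_neg (by simpa using hne)]
  simp only []
  rw [show ((0 : Int) : Int) = 0 from rfl]
  rw [PySem.List.pyRange_zero_natCast clue.length, List.foldl_map]
  have := pv_A_inv clue inter h hne clue.length (le_refl _)
  rw [this]

-- B computes the S-table
theorem pv_B_eq (clue inter : List Int) (h : inter.length = clue.length) (hne : clue ≠ []) :
    inter2pos_py_alt clue inter = (List.range clue.length).map (pvS clue inter) := by
  unfold inter2pos_py_alt
  rw [if_neg (by simpa using hne)]
  simp only []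
  rw [pv_foldl_excl clue [] 0, pv_foldl_incl inter [] 0]
  rw [PySem.List.pyRange_zero_natCast clue.length, List.map_map]
  apply List.map_congr_left
  intro i hi
  have hik : i < clue.length := List.mem_range.mp hi
  have hii : i < inter.length := by omega
  simp only [Function.comp]
  rw [PySem.List.pyGetD_natCast, PySem.List.pyGetD_natCast]
  rw [List.nil_append, List.nil_append]
  rw [PySem.List.getD_map_range _ _ _ _ hik, PySem.List.getD_map_range _ _ _ _ hii]
  simp [pvS]

-- ===== VERDICT (by name: the statement is the Claim_ definition above) =====
theorem inter2pos_py_spec : Claim_equal_inter2pos_py := by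
  intro clue inter _hdom hpre
  unfold Spec_inter2pos_py
  rcases hpre with hnil | hlen
  · subst hnil; rfl
  · by_cases hne : clue = []
    · subst hne; rfl
    · rw [pv_A_eq clue inter hlen hne, pv_B_eq clue inter hlen hne]
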